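-- pv_equiv track=rewrite | github.com/trapsena/laboratorio-de-algoritimos2 | week 3/main (5).py | robb
-- ===== SOURCE A (Python) =====
-- def robb(matrix):
--     n = len(matrix)
--     bigger = 0
--
--     for line in range(n):
--         side = 1
--         horiz = 1
--         for colune in range(n):
--             side *= matrix[line][colune]
--             horiz *= matrix[colune][line]
--
--         if side > bigger:
--             bigger = side
--         if horiz > bigger:
--             bigger = horiz
--
--
--     diag = 1
--     rev_diag = 1
--
--     for i in range(n):
--         diag *= matrix[i][i]
--         rev_diag *= matrix[i][n - i - 1]
--     if rev_diag > diag: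
--         diag = rev_diag
--     if diag > bigger:
--         bigger = diag
--
--
--     return bigger
-- ===== SOURCE B (Python) =====
-- def robb(matrix):
--     n = len(matrix)
--     col = [1] * n
--     diag = 1
--     anti = 1
--     best = 0
--     for i, row in enumerate(matrix):
--         r = 1
--         for v in row[:n]:
--             r *= v
--         col = [c * v for c, v in zip(col, row)]
--         diag *= row[i]
--         anti *= row[n - 1 - i]
--         if r > best:
--             best = r
--     for c in col:
--         if c > best:
--             best = c
--     alt = diag if diag >= anti else anti
--     return alt if alt > best else best
-- ===== Notes on version B (the rewrite author's own statement) =====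
-- stated objective: alternative
-- what changed: A makes column-major re-reads with nested index loops and interleaved running-max updates; B streams the matrix row by row once via enumerate, maintaining a vector of n column-product accumulators (updated by zip) plus diagonal/anti-diagonal accumulators, and only afterwards folds the max over the accumulators.
import Mathlib
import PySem

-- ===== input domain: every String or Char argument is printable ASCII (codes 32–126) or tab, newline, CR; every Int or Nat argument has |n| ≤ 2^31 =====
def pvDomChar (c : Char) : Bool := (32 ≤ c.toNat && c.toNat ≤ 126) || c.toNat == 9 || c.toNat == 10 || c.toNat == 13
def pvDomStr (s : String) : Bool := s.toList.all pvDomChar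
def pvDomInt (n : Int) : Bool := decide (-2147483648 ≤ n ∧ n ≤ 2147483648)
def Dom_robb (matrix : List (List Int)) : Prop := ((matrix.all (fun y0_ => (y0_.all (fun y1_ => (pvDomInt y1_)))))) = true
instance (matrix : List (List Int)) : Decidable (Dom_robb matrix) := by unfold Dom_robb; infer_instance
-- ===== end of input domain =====

-- B replaces A's nested index loops (which re-read the matrix column-major) by one
-- streaming row-by-row pass keeping a vector of column-product accumulators plus
-- diagonal accumulators, taking the max afterwards — an alternative decomposition.

-- matrix[i][j] (indices in range under Pre_robb)
def pvGet2 (matrix : List (List Int)) (i j : Int) : Int :=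
  PySem.List.pyGetD (PySem.List.pyGetD matrix i []) j 0

-- ===== PORT A =====
def robb (matrix : List (List Int)) : Int :=
  let n : Int := matrix.length
  let bigger : Int := 0
  let bigger := (PySem.List.pyRange 0 n 1).foldl (fun bigger line =>
    let sh := (PySem.List.pyRange 0 n 1).foldl
      (fun (sh : Int × Int) colune =>
        (sh.1 * pvGet2 matrix line colune, sh.2 * pvGet2 matrix colune line)) (1, 1)
    let bigger := if sh.1 > bigger then sh.1 else bigger
    let bigger := if sh.2 > bigger then sh.2 else bigger
    bigger) bigger
  let dr := (PySem.List.pyRange 0 n 1).foldl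
    (fun (dr : Int × Int) i =>
      (dr.1 * pvGet2 matrix i i, dr.2 * pvGet2 matrix i (n - i - 1))) (1, 1)
  let diag := if dr.2 > dr.1 then dr.2 else dr.1
  if diag > bigger then diag else bigger

-- ===== PORT B =====
def robb_alt (matrix : List (List Int)) : Int :=
  let n : Int := matrix.length
  -- state: (col accumulators, diag, anti, best) threaded through 'for i, row in enumerate(matrix)'
  let st := (PySem.List.enumerate matrix 0).foldl
    (fun (st : List Int × Int × Int × Int) (p : Int × List Int) =>
      let r := (PySem.List.slice p.2 none (some n)).foldl (fun r v => r * v) 1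
      ((st.1.zip p.2).map (fun cv => cv.1 * cv.2),
       st.2.1 * PySem.List.pyGetD p.2 p.1 0,
       st.2.2.1 * PySem.List.pyGetD p.2 (n - 1 - p.1) 0,
       if r > st.2.2.2 then r else st.2.2.2))
    (List.replicate matrix.length 1, 1, 1, 0)
  let best := st.1.foldl (fun b c => if c > b then c else b) st.2.2.2
  let alt := if st.2.1 ≥ st.2.2.1 then st.2.1 else st.2.2.1
  if alt > best then alt else best

-- ===== PRECONDITION & SPEC =====
-- A indexes matrix[line][colune] for all line, colune < len(matrix): it raises IndexError
-- unless every row has at least len(matrix) entries.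
def Pre_robb (matrix : List (List Int)) : Prop :=
  ∀ row ∈ matrix, matrix.length ≤ row.length
instance (matrix : List (List Int)) : Decidable (Pre_robb matrix) := by
  unfold Pre_robb; infer_instance
def pvWitness_robb : List (List Int) := [[1, -2], [3, 4]]

def Spec_robb (matrix : List (List Int)) (out : Int) : Prop := out = robb_alt matrix
instance (matrix : List (List Int)) (out : Int) : Decidable (Spec_robb matrix out) := by unfold Spec_robb; infer_instance

-- ===== CLAIM (what is proved, stated in full; the proofs are below) =====
def Claim_equal_robb : Prop := ∀ (matrix : List (List Int)), Dom_robb matrix → Pre_robb matrix → Spec_robb matrix (robb matrix)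

-- ===== LEMMAS AND PROOFS =====

-- (if x > b then x else b) = max b x on Int
theorem pv_if_gt_eq_max (b x : Int) : (if x > b then x else b) = max b x := by
  rw [max_def]; split_ifs <;> omega

-- a pair fold splits into two independent folds
theorem pv_foldl_pair (l : List Int) (f g : Int → Int) (a b : Int) :
    l.foldl (fun (p : Int × Int) x => (p.1 * f x, p.2 * g x)) (a, b)
      = (l.foldl (fun s x => s * f x) a, l.foldl (fun s x => s * g x) b) := by
  induction l generalizing a b with
  | nil => rfl
  | cons x t ih => simp [List.foldl_cons, ih]

-- a 4-tuple fold splits into four independent folds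
theorem pv_foldl_quad {α : Type} (l : List α)
    (f1 : List Int → α → List Int) (f2 f3 f4 : Int → α → Int)
    (c : List Int) (d a b : Int) :
    l.foldl (fun (st : List Int × Int × Int × Int) x =>
        (f1 st.1 x, f2 st.2.1 x, f3 st.2.2.1 x, f4 st.2.2.2 x)) (c, d, a, b)
      = (l.foldl f1 c, l.foldl f2 d, l.foldl f3 a, l.foldl f4 b) := by
  induction l generalizing c d a b with
  | nil => rfl
  | cons x t ih => simp [List.foldl_cons, ih]

-- foldl max over a permutation is unchanged
theorem pv_foldl_max_perm {l l' : List Int} (h : l.Perm l') (b : Int) :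
    l.foldl max b = l'.foldl max b := by
  induction h generalizing b with
  | nil => rfl
  | cons x _ ih => simp [List.foldl_cons, ih]
  | swap x y l => simp only [List.foldl_cons]; rw [max_right_comm]
  | trans _ _ ih1 ih2 => rw [ih1, ih2]

-- the interleaved running max is the foldl max over the flattened pair list
theorem pv_foldl_interleave (l : List Int) (S H : Int → Int) (b : Int) :
    l.foldl (fun b i => max (max b (S i)) (H i)) b
      = (l.flatMap (fun i => [S i, H i])).foldl max b := by
  induction l generalizing b with
  | nil => rfl
  | cons x t ih =>
    simp only [List.foldl_cons, List.flatMap_cons]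
    rw [ih, List.foldl_append]
    simp [max_assoc]

theorem pv_flatMap_perm (l : List Int) (S H : Int → Int) :
    (l.flatMap (fun i => [S i, H i])).Perm (l.map S ++ l.map H) := by
  induction l with
  | nil => simp
  | cons x t ih =>
    simp only [List.flatMap_cons, List.map_cons, List.cons_append]
    refine List.Perm.trans (List.Perm.cons _ (List.Perm.cons _ ih)) ?_
    exact List.Perm.cons _ List.perm_middle.symm

-- folds of equal step functions on members agree
theorem pv_foldl_congr {α : Type} (l : List α) (f g : Int → α → Int) (b : Int)
    (h : ∀ x ∈ l, ∀ a, f a x = g a x) : l.foldl f b = l.foldl g b := by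
  induction l generalizing b with
  | nil => rfl
  | cons x t ih =>
    simp only [List.foldl_cons, h x (List.mem_cons_self)]
    exact ih _ (fun y hy a => h y (List.mem_cons_of_mem _ hy) a)

-- B's per-row product (r *= v over row[:n])
def pvRP (n : Int) (row : List Int) : Int :=
  (PySem.List.slice row none (some n)).foldl (fun r v => r * v) 1

-- row product: A's inner index loop over matrix[line][·] equals B's loop over row[:n]
theorem pv_row_prod (n : Nat) (row : List Int) (hlen : n ≤ row.length) :
    (PySem.List.pyRange 0 (n : Int) 1).foldl
        (fun s j => s * PySem.List.pyGetD row j 0) 1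
      = pvRP (n : Int) row := by
  rw [pvRP, PySem.List.slice_to_natCast]
  have h2 := PySem.List.foldl_pyRange_zero_pyGetD (row.take n) (0 : Int)
      (fun (s x : Int) => s * x) 1
  rw [show PySem.List.len (row.take n) = (n : Int) from by
        simp [PySem.List.len]; omega] at h2
  rw [← h2]
  apply pv_foldl_congr
  intro j hj a
  rw [PySem.List.mem_pyRange_one] at hj
  congr 1
  rw [PySem.List.pyGetD_eq_getElem (h0 := hj.1) (h1 := by omega),
      PySem.List.pyGetD_eq_getElem (h0 := hj.1)
        (h1 := by simp only [List.length_take]; push_cast; omega)]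
  rw [List.getElem_take]

-- named pieces of A's computation
def pvS (matrix : List (List Int)) (line : Int) : Int :=
  (PySem.List.pyRange 0 (matrix.length : Int) 1).foldl
    (fun s j => s * pvGet2 matrix line j) 1
def pvH (matrix : List (List Int)) (line : Int) : Int :=
  (PySem.List.pyRange 0 (matrix.length : Int) 1).foldl
    (fun s j => s * pvGet2 matrix j line) 1
def pvD (matrix : List (List Int)) : Int :=
  (PySem.List.pyRange 0 (matrix.length : Int) 1).foldl
    (fun s i => s * pvGet2 matrix i i) 1
def pvR (matrix : List (List Int)) : Int :=
  (PySem.List.pyRange 0 (matrix.length : Int) 1).foldl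
    (fun s i => s * pvGet2 matrix i ((matrix.length : Int) - i - 1)) 1

-- closed form of A's port
theorem pv_robb_eq (matrix : List (List Int)) :
    robb matrix
      = max ((PySem.List.pyRange 0 (matrix.length : Int) 1).foldl
              (fun b i => max (max b (pvS matrix i)) (pvH matrix i)) 0)
            (max (pvD matrix) (pvR matrix)) := by
  unfold robb
  simp only [pv_foldl_pair, pv_if_gt_eq_max]
  rfl

-- B's column accumulators after the streaming pass are the column products
theorem pv_col_step (n : Nat) (row : List Int) (g : Nat → Int)
    (hr : n ≤ row.length) :
    (((List.range n).map g).zip row).map (fun cv => cv.1 * cv.2)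
      = (List.range n).map (fun (j : Nat) => g j * PySem.List.pyGetD row (j : Int) 0) := by
  apply List.ext_getElem
  · simp; omega
  · intro k hk _
    have hkn : k < n := by simpa using (by simpa using hk : k < min n row.length).trans_le (le_refl _) |>.trans_le (by omega)
    simp [List.getElem_zip, PySem.List.pyGetD_natCast, List.getD_eq_getElem?_getD,
      List.getElem?_eq_getElem (show k < row.length by omega)]

theorem pv_col_fold (matrix : List (List Int)) (n : Nat)
    (hpre : ∀ row ∈ matrix, n ≤ row.length) (g : Nat → Int) :
    matrix.foldl (fun col row => (col.zip row).map (fun cv => cv.1 * cv.2))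
        ((List.range n).map g)
      = (List.range n).map (fun (j : Nat) =>
          matrix.foldl (fun s row => s * PySem.List.pyGetD row (j : Int) 0) (g j)) := by
  induction matrix generalizing g with
  | nil => rfl
  | cons row t ih =>
    simp only [List.foldl_cons]
    rw [pv_col_step n row g (hpre row List.mem_cons_self),
        ih (fun r hr => hpre r (List.mem_cons_of_mem _ hr))]

-- columns: pvH as a fold over the rows
theorem pv_pvH_eq (matrix : List (List Int)) (j : Int) :
    pvH matrix j = matrix.foldl (fun s row => s * PySem.List.pyGetD row j 0) 1 := by
  unfold pvH
  have h2 := PySem.List.foldl_pyRange_zero_pyGetD matrix ([] : List Int)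
      (fun (s : Int) (row : List Int) => s * PySem.List.pyGetD row j 0) 1
  rw [show PySem.List.len matrix = (matrix.length : Int) from by simp [PySem.List.len]] at h2
  rw [← h2]
  rfl

-- (if a >= b then a else b) = max b a on Int
theorem pv_if_ge_eq_max (a b : Int) : (if a ≥ b then a else b) = max b a := by
  by_cases h : b ≤ a
  · rw [if_pos (show a ≥ b from h), max_eq_right h]
  · rw [if_neg (show ¬ a ≥ b from h), max_eq_left (by omega)]

-- a fold over enumerate that only uses the element is a fold over the list
theorem pv_foldl_enum_snd {α β : Type} (l : List α) (s : Int) (h : β → α → β) (init : β) :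
    (PySem.List.enumerate l s).foldl (fun st p => h st p.2) init = l.foldl h init := by
  rw [← List.foldl_map, PySem.List.map_snd_enumerate]

-- closed form of B's port
theorem pv_robb_alt_eq (matrix : List (List Int))
    (hpre : ∀ row ∈ matrix, matrix.length ≤ row.length) :
    robb_alt matrix
      = max ((matrix.map (pvRP (matrix.length : Int))
              ++ (PySem.List.pyRange 0 (matrix.length : Int) 1).map (pvH matrix)).foldl max 0)
            (max (pvD matrix) (pvR matrix)) := by
  unfold robb_alt
  dsimp only
  rw [pv_foldl_quad (PySem.List.enumerate matrix 0)
      (fun col p => (col.zip p.2).map (fun cv => cv.1 * cv.2))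
      (fun d p => d * PySem.List.pyGetD p.2 p.1 0)
      (fun a p => a * PySem.List.pyGetD p.2 ((matrix.length : Int) - 1 - p.1) 0)
      (fun b p => if (PySem.List.slice p.2 none (some (matrix.length : Int))).foldl (fun r v => r * v) 1 > b
                  then (PySem.List.slice p.2 none (some (matrix.length : Int))).foldl (fun r v => r * v) 1 else b)]
  dsimp only
  -- column accumulators
  have hcol : (PySem.List.enumerate matrix 0).foldl
        (fun col (p : Int × List Int) => (col.zip p.2).map (fun cv => cv.1 * cv.2))
        (List.replicate matrix.length 1)
      = (PySem.List.pyRange 0 (matrix.length : Int) 1).map (pvH matrix) := by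
    rw [show (PySem.List.enumerate matrix 0).foldl
          (fun col (p : Int × List Int) => (col.zip p.2).map (fun cv => cv.1 * cv.2))
          (List.replicate matrix.length 1)
        = matrix.foldl (fun col row => (col.zip row).map (fun cv => cv.1 * cv.2))
            (List.replicate matrix.length 1)
      from pv_foldl_enum_snd matrix 0
            (fun col row => (col.zip row).map (fun cv => cv.1 * cv.2))
            (List.replicate matrix.length 1)]
    have hrep : (List.replicate matrix.length (1 : Int))
        = (List.range matrix.length).map (fun _ => (1 : Int)) := by
      simp [List.map_const']
    rw [hrep, pv_col_fold matrix matrix.length hpre (fun _ => 1)]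
    rw [PySem.List.pyRange_zero_natCast, List.map_map]
    apply List.map_congr_left
    intro j _
    rw [Function.comp_apply, pv_pvH_eq]
  -- diagonal
  have hdiag : (PySem.List.enumerate matrix 0).foldl
        (fun d (p : Int × List Int) => d * PySem.List.pyGetD p.2 p.1 0) 1
      = pvD matrix := by
    rw [PySem.List.enumerate_eq_map_pyRange (d := ([] : List Int)), List.foldl_map]
    unfold pvD
    rw [show PySem.List.len matrix = (matrix.length : Int) from by simp [PySem.List.len]]
    rfl
  -- anti-diagonal
  have hanti : (PySem.List.enumerate matrix 0).foldl
        (fun a (p : Int × List Int) => a * PySem.List.pyGetD p.2 ((matrix.length : Int) - 1 - p.1) 0) 1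
      = pvR matrix := by
    rw [PySem.List.enumerate_eq_map_pyRange (d := ([] : List Int)), List.foldl_map]
    unfold pvR
    rw [show PySem.List.len matrix = (matrix.length : Int) from by simp [PySem.List.len]]
    apply pv_foldl_congr
    intro j _ a
    unfold pvGet2
    rw [show (matrix.length : Int) - 1 - j = (matrix.length : Int) - j - 1 from by ring]
  -- running best of the row products
  have hbest : (PySem.List.enumerate matrix 0).foldl
        (fun b (p : Int × List Int) =>
          if (PySem.List.slice p.2 none (some (matrix.length : Int))).foldl (fun r v => r * v) 1 > b
          then (PySem.List.slice p.2 none (some (matrix.length : Int))).foldl (fun r v => r * v) 1 else b) 0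
      = (matrix.map (pvRP (matrix.length : Int))).foldl max 0 := by
    rw [show (PySem.List.enumerate matrix 0).foldl
          (fun b (p : Int × List Int) =>
            if (PySem.List.slice p.2 none (some (matrix.length : Int))).foldl (fun r v => r * v) 1 > b
            then (PySem.List.slice p.2 none (some (matrix.length : Int))).foldl (fun r v => r * v) 1 else b) 0
        = matrix.foldl
            (fun b row =>
              if (PySem.List.slice row none (some (matrix.length : Int))).foldl (fun r v => r * v) 1 > b
              then (PySem.List.slice row none (some (matrix.length : Int))).foldl (fun r v => r * v) 1 else b) 0
      from pv_foldl_enum_snd matrix 0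
            (fun b row =>
              if (PySem.List.slice row none (some (matrix.length : Int))).foldl (fun r v => r * v) 1 > b
              then (PySem.List.slice row none (some (matrix.length : Int))).foldl (fun r v => r * v) 1 else b) 0,
        List.foldl_map]
    simp only [pv_if_gt_eq_max]
    rfl
  rw [hcol, hdiag, hanti, hbest]
  simp only [pv_if_gt_eq_max, pv_if_ge_eq_max]
  rw [List.foldl_append, max_comm (pvR matrix) (pvD matrix)]

-- ===== VERDICT (by name: the statement is the Claim_ definition above) =====
theorem robb_spec : Claim_equal_robb := by
  intro matrix _ hpre
  unfold Spec_robb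
  rw [pv_robb_eq, pv_robb_alt_eq matrix hpre]
  rw [pv_foldl_interleave]
  have hperm : ((PySem.List.pyRange 0 (matrix.length : Int) 1).flatMap
        (fun i => [pvS matrix i, pvH matrix i])).Perm
      ((PySem.List.pyRange 0 (matrix.length : Int) 1).map (pvS matrix)
        ++ (PySem.List.pyRange 0 (matrix.length : Int) 1).map (pvH matrix)) :=
    pv_flatMap_perm _ _ _
  rw [pv_foldl_max_perm hperm 0]
  have hrows : (PySem.List.pyRange 0 (matrix.length : Int) 1).map (pvS matrix)
      = matrix.map (pvRP (matrix.length : Int)) := by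
    conv_rhs => rw [← PySem.List.map_pyGetD_pyRange_zero matrix ([] : List Int)]
    rw [List.map_map]
    apply List.map_congr_left
    intro j hj
    rw [PySem.List.mem_pyRange_one] at hj
    have hmem : PySem.List.pyGetD matrix j [] ∈ matrix :=
      PySem.List.pyGetD_mem matrix []
        (by constructor <;> [omega; exact hj.2])
    have := pv_row_prod matrix.length (PySem.List.pyGetD matrix j []) (hpre _ hmem)
    simpa [pvS, pvGet2] using this
  rw [hrows, max_comm (pvD matrix) (pvR matrix)]
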